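-- pv_equiv track=rewrite | github.com/ashrobertsdragon/auto-chunker | data_preparation.py | adjust_to_newline
-- ===== SOURCE A (Python) =====
-- def adjust_to_newline(tokens: list[int], end_index: int) -> int:
--     """
--     Adjusts the end index to the end of the last paragraph, based on token ids
--     indicating the end of a paragraph
--     """
--     end_paragraph_tokens = [
--         198,
--         627,
--         4999,
--         5380,
--         702,
--         10246,
--         25765,
--         48469,
--         34184,
--         1270,
--         7058,
--         7233,
--         11192,
--     ]
--     while end_index > 0 and tokens[end_index - 1] not in end_paragraph_tokens:
--         end_index -= 1
--     return end_index
-- ===== SOURCE B (Python) =====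
-- PARAGRAPH_END_TOKENS = frozenset({
--     198, 627, 4999, 5380, 702, 10246, 25765,
--     48469, 34184, 1270, 7058, 7233, 11192,
-- })
--
--
-- def adjust_to_newline(tokens: list[int], end_index: int) -> int:
--     """
--     Adjusts the end index to the end of the last paragraph, based on token ids
--     indicating the end of a paragraph
--     """
--     if end_index <= 0:
--         return end_index
--     last = -1
--     for i in range(end_index):
--         if tokens[i] in PARAGRAPH_END_TOKENS:
--             last = i
--     return last + 1
-- ===== Notes on version B (the rewrite author's own statement) =====
-- stated objective: alternative
-- what changed: Replaced A's backward early-stopping while-loop (decrement end_index until a paragraph-end token precedes it) by a single forward keep-last-match pass over range(end_index) with a frozenset membership test, keeping the last matching index and returning last+1.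
import Mathlib
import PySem

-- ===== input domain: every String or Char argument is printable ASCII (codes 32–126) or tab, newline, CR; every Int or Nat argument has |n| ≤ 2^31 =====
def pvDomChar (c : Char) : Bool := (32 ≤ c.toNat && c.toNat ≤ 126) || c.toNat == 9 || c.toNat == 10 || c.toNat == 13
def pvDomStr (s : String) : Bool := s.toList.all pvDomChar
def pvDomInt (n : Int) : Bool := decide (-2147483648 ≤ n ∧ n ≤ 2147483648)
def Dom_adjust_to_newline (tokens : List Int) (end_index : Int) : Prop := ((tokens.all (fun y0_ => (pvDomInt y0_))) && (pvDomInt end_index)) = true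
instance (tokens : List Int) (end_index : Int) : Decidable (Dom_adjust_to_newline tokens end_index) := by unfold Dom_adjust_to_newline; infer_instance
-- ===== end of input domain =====

-- B replaces A's backward early-stopping while-loop by a single forward keep-last-match
-- pass over the prefix tokens[:end_index]; objective: alternative decomposition, same result.

-- ===== PORT A =====
def pvParaTokens : List Int := [198, 627, 4999, 5380, 702, 10246, 25765, 48469, 34184, 1270, 7058, 7233, 11192]

-- literal port of A's while-loop; pyGetD default 0 is only reached where Python raises
-- IndexError (end_index > len(tokens)), which Pre_ excludes.
def adjust_to_newline (tokens : List Int) (end_index : Int) : Int :=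
  if h : 0 < end_index ∧ (PySem.List.pyGetD tokens (end_index - 1) 0) ∉ pvParaTokens then
    adjust_to_newline tokens (end_index - 1)
  else
    end_index
termination_by end_index.toNat
decreasing_by omega

-- ===== PORT B =====
-- pyGetD default 0 is only reached where Python B raises IndexError (excluded by Pre_).
def adjust_to_newline_alt (tokens : List Int) (end_index : Int) : Int :=
  if end_index ≤ 0 then end_index
  else
    (PySem.List.pyRange 0 end_index 1).foldl
      (fun acc i => if PySem.List.pyGetD tokens i 0 ∈ pvParaTokens then i else acc) (-1) + 1

-- ===== PRECONDITION & SPEC =====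
-- Pre_ excludes exactly the inputs where A raises IndexError (end_index > len(tokens)).
def Pre_adjust_to_newline (tokens : List Int) (end_index : Int) : Prop :=
  end_index ≤ tokens.length
instance (tokens : List Int) (end_index : Int) : Decidable (Pre_adjust_to_newline tokens end_index) := by unfold Pre_adjust_to_newline; infer_instance

def pvWitness_adjust_to_newline : List Int × Int := ([198, 5, 7], 2)

def Spec_adjust_to_newline (tokens : List Int) (end_index : Int) (out : Int) : Prop := out = adjust_to_newline_alt tokens end_index
instance (tokens : List Int) (end_index : Int) (out : Int) : Decidable (Spec_adjust_to_newline tokens end_index out) := by unfold Spec_adjust_to_newline; infer_instance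

-- ===== CLAIM (what is proved, stated in full; the proofs are below) =====
def Claim_equal_adjust_to_newline : Prop := ∀ (tokens : List Int) (end_index : Int), Dom_adjust_to_newline tokens end_index → Pre_adjust_to_newline tokens end_index → Spec_adjust_to_newline tokens end_index (adjust_to_newline tokens end_index)

-- ===== LEMMAS AND PROOFS =====

-- the value B's fold computes over range(n), plus one
def pvF (tokens : List Int) (n : Nat) : Int :=
  (PySem.List.pyRange 0 (n : Int) 1).foldl
    (fun acc i => if PySem.List.pyGetD tokens i 0 ∈ pvParaTokens then i else acc) (-1) + 1

theorem pvF_zero (tokens : List Int) : pvF tokens 0 = 0 := rfl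

theorem alt_eq_pvF (tokens : List Int) (n : Nat) :
    adjust_to_newline_alt tokens (n : Int) = pvF tokens n := by
  unfold adjust_to_newline_alt pvF
  rcases Nat.eq_zero_or_pos n with h | h
  · subst h; simp [PySem.List.pyRange_one_eq_nil]
  · have : ¬ ((n : Int) ≤ 0) := by omega
    simp only [this, if_false]

theorem pvF_succ (tokens : List Int) (n : Nat) (h : n < tokens.length) :
    pvF tokens (n + 1) =
      if tokens[n] ∈ pvParaTokens then (n : Int) + 1 else pvF tokens n := by
  unfold pvF
  have hr : PySem.List.pyRange 0 ((n + 1 : Nat) : Int) 1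
      = PySem.List.pyRange 0 (n : Int) 1 ++ [(n : Int)] := by
    push_cast
    exact PySem.List.pyRange_one_succ_right (by omega)
  have hget : PySem.List.pyGetD tokens ((n : Int)) 0 = tokens[n] := by
    rw [PySem.List.pyGetD_natCast]
    simp [List.getD_eq_getElem?_getD, List.getElem?_eq_getElem h]
  rw [hr, List.foldl_append]
  simp only [List.foldl_cons, List.foldl_nil, hget]
  by_cases hm : tokens[n] ∈ pvParaTokens <;> simp [hm]

theorem a_eq_pvF (tokens : List Int) (n : Nat) (h : n ≤ tokens.length) :
    adjust_to_newline tokens (n : Int) = pvF tokens n := by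
  induction n with
  | zero =>
    rw [adjust_to_newline]
    simp [pvF_zero]
  | succ k ih =>
    have hk : k < tokens.length := by omega
    have hc : (((k + 1 : Nat)) : Int) - 1 = (k : Int) := by push_cast; ring
    have hgetD : PySem.List.pyGetD tokens ((((k + 1 : Nat)) : Int) - 1) 0 = tokens[k] := by
      rw [hc, PySem.List.pyGetD_natCast]
      simp [List.getD_eq_getElem?_getD, List.getElem?_eq_getElem hk]
    rw [adjust_to_newline, pvF_succ tokens k hk]
    by_cases hm : tokens[k] ∈ pvParaTokens
    · rw [dif_neg (by rw [hgetD]; simp [hm]), if_pos hm]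
      push_cast; ring
    · rw [dif_pos ⟨by exact_mod_cast Nat.succ_pos k, by rw [hgetD]; exact hm⟩, if_neg hm, hc]
      exact ih (by omega)

-- ===== VERDICT (by name: the statement is the Claim_ definition above) =====
theorem adjust_to_newline_spec : Claim_equal_adjust_to_newline := by
  intro tokens end_index _dom hpre
  unfold Spec_adjust_to_newline
  by_cases hle : end_index ≤ 0
  · rw [adjust_to_newline]
    have : ¬ (0 < end_index ∧ PySem.List.pyGetD tokens (end_index - 1) 0 ∉ pvParaTokens) := by
      intro ⟨h1, _⟩; omega
    rw [dif_neg this]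
    unfold adjust_to_newline_alt
    simp [hle]
  · have hpos : 0 < end_index := by omega
    obtain ⟨n, rfl⟩ : ∃ n : Nat, end_index = (n : Int) :=
      ⟨end_index.toNat, by omega⟩
    have hn : n ≤ tokens.length := by unfold Pre_adjust_to_newline at hpre; omega
    rw [a_eq_pvF tokens n hn, alt_eq_pvF]
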